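-- pv_equiv track=rewrite | github.com/ahsanNafi/Testris-AI | new_ai.py | count_holes
-- ===== SOURCE A (Python) =====
-- def aggregate_height(playField):
--     # Calculate aggregate height
--     # Argument: array (play field)
--     # Returns: integer (aggregate height)
--
--     # The height of each column is the actual height - number of zeros (excl. holes)
--     # so, count the zeros, subtract the total number of holes, then
--     # subtract that number from the total number of cells which can be calculated
--     # by the length of the list of lists times the length of the inside lists.
--
--     numRows = len(playField)
--     numCols = len(playField[0])
--     zerocount = 0
--     aggHeight = 0
--
--     for i in range(numCols):
--         for j in range(numRows):
--
--             if (playField[j][i] == 0):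
--                 zerocount += 1
--             else:
--                 break
--
--         aggHeight += (numRows - zerocount)
--         zerocount = 0
--
--     return (aggHeight)
--
-- def count_holes(playField, aggregateHeight = -1 ):
--     # count the number of holes in the playField
--     # holes are defined as infilled cells that cannot be accessed.
--     # For this, we determine how many empty cells are in the entire playfield
--     # then we subtract the total number of cells and add back in the aggregate height
--     # this gives us an admittedly inaccurate, but close, number of holes.
--
--     zeroCount = 0
--     hole = 0
--     holeCount = 0
--
--     totalCells = len(playField) * len(playField[0])
--
--     for row in playField:
--         zeroCount += row.count(hole)
--
--     if (aggregateHeight < 0):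
--         holeCount = zeroCount - ( totalCells - aggregate_height(playField) )
--     else:
--         holeCount = zeroCount - ( totalCells - aggregateHeight )
--
--     return holeCount
-- ===== SOURCE B (Python) =====
-- def count_holes(playField, aggregateHeight = -1):
--     # Count holes directly per column instead of via the zero-count/aggregate-height
--     # subtraction; the explicit-aggregateHeight branch keeps the original formula.
--     numRows = len(playField)
--     numCols = len(playField[0])
--     if aggregateHeight < 0:
--         holes = 0
--         for i in range(numCols):
--             seen_filled = False
--             for j in range(numRows):
--                 if playField[j][i] != 0:
--                     seen_filled = True
--                 elif seen_filled:
--                     holes += 1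
--         return holes
--     zeroCount = 0
--     for row in playField:
--         zeroCount += row.count(0)
--     return zeroCount - (numRows * numCols - aggregateHeight)
-- ===== Notes on version B (the rewrite author's own statement) =====
-- stated objective: simpler
-- what changed: The default branch counts holes directly with a per-column seen-filled scan instead of A's separate aggregate_height pass plus the zeroCount-(totalCells-aggregateHeight) subtraction identity; the explicit-aggregateHeight branch keeps A's subtraction formula.
-- outside the precondition, e.g. on count_holes([], -1): A raises IndexError, B raises IndexError; on count_holes([[0], [1, 0]], -1): A returns 1, B returns 0
import Mathlib
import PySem

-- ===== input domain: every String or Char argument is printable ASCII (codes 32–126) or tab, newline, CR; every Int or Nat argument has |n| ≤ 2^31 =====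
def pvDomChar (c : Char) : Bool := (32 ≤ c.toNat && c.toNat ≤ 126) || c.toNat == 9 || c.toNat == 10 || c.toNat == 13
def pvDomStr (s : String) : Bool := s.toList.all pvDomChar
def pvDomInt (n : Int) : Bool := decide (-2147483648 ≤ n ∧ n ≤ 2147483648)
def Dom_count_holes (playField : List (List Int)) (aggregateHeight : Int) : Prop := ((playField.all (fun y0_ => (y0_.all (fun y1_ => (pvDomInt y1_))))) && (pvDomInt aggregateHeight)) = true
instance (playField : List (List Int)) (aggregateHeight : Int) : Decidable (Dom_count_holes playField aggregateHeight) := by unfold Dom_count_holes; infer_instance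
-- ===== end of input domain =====

-- B counts holes directly per column (seen-filled scan) instead of A's zero-count /
-- aggregate-height subtraction; the explicit-aggregateHeight branch keeps A's formula.


-- ===== PORT A =====
-- inner 'for j in range(numRows): if playField[j][i]==0: zerocount+=1 else: break':
-- leading zeros of column i (pyGetD is exact on Pre_, where every index is in range)
def count_holes_colZeros (rows : List (List Int)) (i : Int) : Int :=
  match rows with
  | [] => 0
  | r :: rest =>
    if PySem.List.pyGetD r i 0 == 0 then 1 + count_holes_colZeros rest i else 0

def aggregate_height (playField : List (List Int)) : Int :=
  let numRows : Int := playField.length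
  let numCols : Int := (PySem.List.pyGetD playField 0 []).length
  (PySem.List.pyRange 0 numCols 1).foldl
    (fun aggHeight i => aggHeight + (numRows - count_holes_colZeros playField i)) 0

def count_holes (playField : List (List Int)) (aggregateHeight : Int) : Int :=
  let totalCells : Int := (playField.length : Int) * ((PySem.List.pyGetD playField 0 []).length : Int)
  let zeroCount : Int :=
    playField.foldl (fun acc row => acc + (PySem.List.count row (0 : Int) : Int)) 0
  if aggregateHeight < 0 then
    zeroCount - (totalCells - aggregate_height playField)
  else
    zeroCount - (totalCells - aggregateHeight)

-- ===== PORT B =====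
-- 'for j in range(numRows): if cell != 0: seen = True elif seen: holes += 1' for one column
def count_holes_colHoles (rows : List (List Int)) (i : Int) (seen : Bool) : Int :=
  match rows with
  | [] => 0
  | r :: rest =>
    if PySem.List.pyGetD r i 0 != 0 then count_holes_colHoles rest i true
    else (if seen then 1 else 0) + count_holes_colHoles rest i seen

def count_holes_alt (playField : List (List Int)) (aggregateHeight : Int) : Int :=
  let numRows : Int := playField.length
  let numCols : Int := (PySem.List.pyGetD playField 0 []).length
  if aggregateHeight < 0 then
    (PySem.List.pyRange 0 numCols 1).foldl
      (fun holes i => holes + count_holes_colHoles playField i false) 0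
  else
    (playField.foldl (fun acc row => acc + (PySem.List.count row (0 : Int) : Int)) 0)
      - (numRows * numCols - aggregateHeight)

-- ===== PRECONDITION & SPEC =====
-- Pre_ excludes the empty playField (A's len(playField[0]) raises IndexError) and, in the
-- default aggregateHeight<0 branch, non-rectangular fields: there A either raises IndexError
-- or mixes a whole-row zero count with column scans capped at len(playField[0]), an accidental
-- value no direct hole count matches.
def Pre_count_holes (playField : List (List Int)) (aggregateHeight : Int) : Prop :=
  playField ≠ [] ∧
    (aggregateHeight < 0 →
      ∀ r ∈ playField, r.length = (playField.headD []).length)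
instance (playField : List (List Int)) (aggregateHeight : Int) : Decidable (Pre_count_holes playField aggregateHeight) := by unfold Pre_count_holes; infer_instance

def pvWitness_count_holes : List (List Int) × Int := ([[0, 1], [2, 0], [0, 0]], -1)

def Spec_count_holes (playField : List (List Int)) (aggregateHeight : Int) (out : Int) : Prop := out = count_holes_alt playField aggregateHeight
instance (playField : List (List Int)) (aggregateHeight : Int) (out : Int) : Decidable (Spec_count_holes playField aggregateHeight out) := by unfold Spec_count_holes; infer_instance

-- ===== CLAIM (what is proved, stated in full; the proofs are below) =====
def Claim_equal_count_holes : Prop := ∀ (playField : List (List Int)) (aggregateHeight : Int), Dom_count_holes playField aggregateHeight → Pre_count_holes playField aggregateHeight → Spec_count_holes playField aggregateHeight (count_holes playField aggregateHeight)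

-- ===== LEMMAS AND PROOFS =====

-- number of zeros in column i (seen from the top, no break / no seen flag)
def pvColCount (rows : List (List Int)) (i : Int) : Int :=
  (rows.map (fun r => if PySem.List.pyGetD r i 0 = 0 then (1 : Int) else 0)).sum

theorem colHoles_true (rows : List (List Int)) (i : Int) :
    count_holes_colHoles rows i true = pvColCount rows i := by
  induction rows with
  | nil => simp [count_holes_colHoles, pvColCount]
  | cons r rest ih =>
    simp only [count_holes_colHoles, pvColCount, List.map_cons, List.sum_cons, bne_iff_ne,
      ne_eq, ite_not]
    split_ifs with h <;> simp [pvColCount] at ih ⊢ <;> omega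

theorem colZeros_add_colHoles (rows : List (List Int)) (i : Int) :
    count_holes_colZeros rows i + count_holes_colHoles rows i false = pvColCount rows i := by
  induction rows with
  | nil => simp [count_holes_colZeros, count_holes_colHoles, pvColCount]
  | cons r rest ih =>
    simp only [count_holes_colZeros, count_holes_colHoles, pvColCount, List.map_cons,
      List.sum_cons, beq_iff_eq, bne_iff_ne, ne_eq, ite_not]
    by_cases h : PySem.List.pyGetD r i 0 = 0
    · simp [h, pvColCount] at ih ⊢; omega
    · simp [h, colHoles_true, pvColCount] at ih ⊢

-- one row's zero count as a sum over column indices (needs the row to have numCols cells)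
theorem row_count_as_colsum (r : List Int) :
    (PySem.List.count r (0 : Int) : Int)
      = ((PySem.List.pyRange 0 (r.length : Int) 1).map
          (fun i => if PySem.List.pyGetD r i 0 = 0 then (1 : Int) else 0)).sum := by
  have h := PySem.List.map_pyGetD_pyRange_zero' r (0 : Int)
  calc (PySem.List.count r (0 : Int) : Int)
      = ((List.map (fun v => if v = 0 then (1 : Int) else 0) r)).sum := by
        rw [PySem.List.count_eq]
        rw [show (fun v : Int => if v = 0 then (1 : Int) else 0)
              = fun v => if (v == 0) = true then (1 : Int) else 0 by funext v; simp]
        rw [PySem.List.sum_map_ite_one_zero (fun v => v == 0) r]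
        simp [List.count]
    _ = _ := by
        conv_lhs => rw [← h]
        rw [List.map_map]
        rfl

-- the row-by-row zero count equals the column-by-column zero count on a rectangular field
theorem zeroCount_as_colCounts (pf : List (List Int)) (n : Nat)
    (hrect : ∀ r ∈ pf, r.length = n) :
    (pf.map (fun row => (PySem.List.count row (0 : Int) : Int))).sum
      = ((PySem.List.pyRange 0 (n : Int) 1).map (fun i => pvColCount pf i)).sum := by
  induction pf with
  | nil => simp [pvColCount]
  | cons r rest ih =>
    have hr : r.length = n := hrect r (by simp)
    have hrest : ∀ q ∈ rest, q.length = n := fun q hq => hrect q (by simp [hq])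
    simp only [List.map_cons, List.sum_cons]
    rw [ih hrest, row_count_as_colsum r, hr]
    rw [show (fun i => pvColCount (r :: rest) i)
          = fun i => (if PySem.List.pyGetD r i 0 = 0 then (1 : Int) else 0) + pvColCount rest i by
        funext i; simp [pvColCount]]
    rw [PySem.List.sum_map_add_int]

theorem count_holes_spec' (pf : List (List Int)) (agg : Int)
    (hpre : Pre_count_holes pf agg) :
    count_holes pf agg = count_holes_alt pf agg := by
  obtain ⟨hne, hrect⟩ := hpre
  by_cases hlt : agg < 0
  · -- default branch
    obtain ⟨r0, rest, rfl⟩ : ∃ r0 rest, pf = r0 :: rest := by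
      cases pf with
      | nil => exact absurd rfl hne
      | cons a b => exact ⟨a, b, rfl⟩
    have hrect' : ∀ r ∈ (r0 :: rest), r.length = r0.length := by
      intro r hr; simpa using hrect hlt r hr
    simp only [count_holes, count_holes_alt, aggregate_height, hlt, if_pos,
      PySem.List.pyGetD_zero_cons]
    rw [PySem.List.foldl_add (r0 :: rest) (fun row => (PySem.List.count row (0 : Int) : Int)) 0,
        PySem.List.foldl_add (PySem.List.pyRange 0 (r0.length : Int) 1)
          (fun i => (((r0 :: rest).length : Int)) - count_holes_colZeros (r0 :: rest) i) 0,
        PySem.List.foldl_add (PySem.List.pyRange 0 (r0.length : Int) 1)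
          (fun i => count_holes_colHoles (r0 :: rest) i false) 0]
    rw [zeroCount_as_colCounts (r0 :: rest) r0.length hrect']
    have hsplit :
        ((PySem.List.pyRange 0 (r0.length : Int) 1).map
            (fun i => (((r0 :: rest).length : Int)) - count_holes_colZeros (r0 :: rest) i)).sum
          = ((PySem.List.pyRange 0 (r0.length : Int) 1).map
              (fun _ => (((r0 :: rest).length : Int)))).sum
            + ((PySem.List.pyRange 0 (r0.length : Int) 1).map
              (fun i => - count_holes_colZeros (r0 :: rest) i)).sum := by
      rw [← PySem.List.sum_map_add_int]; ring_nf
    have hconst := PySem.List.sum_map_const_int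
      (PySem.List.pyRange 0 (r0.length : Int) 1) (((r0 :: rest).length : Int))
    have hcomb :
        ((PySem.List.pyRange 0 (r0.length : Int) 1).map
            (fun i => pvColCount (r0 :: rest) i)).sum
          + ((PySem.List.pyRange 0 (r0.length : Int) 1).map
              (fun i => - count_holes_colZeros (r0 :: rest) i)).sum
          = ((PySem.List.pyRange 0 (r0.length : Int) 1).map
              (fun i => count_holes_colHoles (r0 :: rest) i false)).sum := by
      rw [← PySem.List.sum_map_add_int]
      refine congrArg List.sum (List.map_congr_left fun i _ => ?_)
      have := colZeros_add_colHoles (r0 :: rest) i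
      omega
    rw [hsplit, hconst] at *
    simp only [PySem.List.length_pyRange_one] at *
    have hc : ((((r0.length : Int)) - 0).toNat : Int) = (r0.length : Int) := by omega
    rw [hc] at *
    ring_nf at hcomb ⊢
    omega
  · simp [count_holes, count_holes_alt, hlt]

-- ===== VERDICT (by name: the statement is the Claim_ definition above) =====
theorem count_holes_spec : Claim_equal_count_holes := by
  intro pf agg _ hpre
  exact count_holes_spec' pf agg hpre
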